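-- pv_equiv track=rewrite | github.com/pppop00/VRM-Soccer | soccer_bev_pipeline.py | _segment_labels
-- ===== SOURCE A (Python) =====
-- from typing import Any, Callable, Iterable, Optional
--
-- def _segment_labels(labels: list[Optional[str]]) -> list[tuple[int, int, Optional[str]]]:
--     if not labels:
--         return []
--
--     segments: list[tuple[int, int, Optional[str]]] = []
--     start = 0
--     for idx in range(1, len(labels) + 1):
--         if idx < len(labels) and labels[idx] == labels[start]:
--             continue
--         segments.append((start, idx, labels[start]))
--         start = idx
--     return segments
-- ===== SOURCE B (Python) =====
-- from typing import Optional
--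
-- def _segment_labels(labels: list[Optional[str]]) -> list[tuple[int, int, Optional[str]]]:
--     n = len(labels)
--     if n == 0:
--         return []
--     bounds = [i for i in range(n) if i == 0 or labels[i] != labels[i - 1]]
--     bounds.append(n)
--     return [(s, e, labels[s]) for s, e in zip(bounds, bounds[1:])]
-- ===== Notes on version B (the rewrite author's own statement) =====
-- stated objective: alternative
-- what changed: Instead of one accumulator loop with a lookahead comparison, B first computes the list of run-boundary indices (where the label differs from its predecessor) and then zips consecutive boundaries into (start, end, label) segments.
import Mathlib
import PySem

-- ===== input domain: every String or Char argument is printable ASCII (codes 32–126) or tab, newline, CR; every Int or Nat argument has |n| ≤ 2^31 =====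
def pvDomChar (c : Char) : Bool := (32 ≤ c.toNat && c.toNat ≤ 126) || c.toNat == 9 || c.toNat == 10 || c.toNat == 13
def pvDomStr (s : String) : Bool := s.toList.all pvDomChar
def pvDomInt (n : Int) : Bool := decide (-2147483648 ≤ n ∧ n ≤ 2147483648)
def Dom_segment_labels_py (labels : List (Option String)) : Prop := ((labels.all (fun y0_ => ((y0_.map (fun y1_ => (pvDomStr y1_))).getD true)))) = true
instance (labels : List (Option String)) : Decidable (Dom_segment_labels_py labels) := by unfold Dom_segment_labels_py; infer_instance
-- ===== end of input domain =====

-- B replaces A's accumulator loop (lookahead comparison while scanning) by two stages: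
-- first compute the list of run-boundary indices, then zip consecutive boundaries into segments.


-- ===== PORT A =====
-- literal transliteration of A: indices from range(1, len+1); labels[i] via pyGetD
-- (every index used is in range, so the default is never taken).
def segStepA (labels : List (Option String)) (n : Int)
    (st : List (Int × Int × Option String) × Int) (idx : Int) :
    List (Int × Int × Option String) × Int :=
  if idx < n ∧ PySem.List.pyGetD labels idx none = PySem.List.pyGetD labels st.2 none
  then st
  else (st.1 ++ [(st.2, idx, PySem.List.pyGetD labels st.2 none)], idx)

def segment_labels_py (labels : List (Option String)) : List (Int × Int × Option String) :=
  if labels = [] then []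
  else
    let n : Int := labels.length
    ((PySem.List.pyRange 1 (n + 1) 1).foldl (segStepA labels n) ([], 0)).1

-- ===== PORT B =====
-- transliteration of B: bounds = [i for i in range(n) if i == 0 or labels[i] != labels[i-1]]
-- plus the appended n, then zip consecutive boundaries into (s, e, labels[s]).
def segment_labels_py_alt (labels : List (Option String)) : List (Int × Int × Option String) :=
  let n : Int := labels.length
  if n = 0 then []
  else
    let bounds : List Int :=
      ((PySem.List.pyRange 0 n 1).filter
        (fun i => i == 0 || !(PySem.List.pyGetD labels i none == PySem.List.pyGetD labels (i-1) none)))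
      ++ [n]
    (bounds.zip (bounds.drop 1)).map (fun p => (p.1, p.2, PySem.List.pyGetD labels p.1 none))

-- ===== PRECONDITION & SPEC =====
def Spec_segment_labels_py (labels : List (Option String)) (out : List (Int × Int × Option String)) : Prop := out = segment_labels_py_alt labels
instance (labels : List (Option String)) (out : List (Int × Int × Option String)) : Decidable (Spec_segment_labels_py labels out) := by unfold Spec_segment_labels_py; infer_instance

-- ===== CLAIM (what is proved, stated in full; the proofs are below) =====
def Claim_equal_segment_labels_py : Prop := ∀ (labels : List (Option String)), Dom_segment_labels_py labels → Spec_segment_labels_py labels (segment_labels_py labels)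

-- ===== LEMMAS AND PROOFS =====

-- proof-side canonical form: run decomposition with an explicit cursor
def segGroups (cursor : Int) : List (Option String) → List (Int × Int × Option String)
  | [] => []
  | x :: rest =>
      let run := rest.takeWhile (fun y => y == x)
      (cursor, cursor + 1 + run.length, x) ::
        segGroups (cursor + 1 + run.length) (rest.dropWhile (fun y => y == x))
termination_by l => l.length
decreasing_by
  simpa using Nat.lt_succ_of_le (List.length_dropWhile_le _ _)

-- Nat-level boundary list of B and its segment list
def predB (l : List (Option String)) (k : Nat) : Bool :=
  k == 0 || !(l.getD k none == l.getD (k-1) none)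

def boundsN (l : List (Option String)) : List Nat :=
  (List.range l.length).filter (predB l) ++ [l.length]

def resN (l : List (Option String)) : List (Int × Int × Option String) :=
  ((boundsN l).zip ((boundsN l).drop 1)).map
    (fun p => ((p.1 : Int), (p.2 : Int), l.getD p.1 none))

theorem getD_append_length {α : Type} (pre : List α) (y : α) (ys : List α) (d : α) :
    (pre ++ y :: ys).getD pre.length d = y := by
  simp [List.getD]

theorem getD_append_add {α : Type} (as bs : List α) (j : Nat) (d : α) :
    (as ++ bs).getD (as.length + j) d = bs.getD j d := by
  simp [List.getD, List.getElem?_append_right (Nat.le_add_right as.length j)]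

theorem getD_run (x : Option String) (r rest : List (Option String))
    (hr : ∀ y ∈ r, y = x) (j : Nat) (hj : j ≤ r.length) :
    (x :: r ++ rest).getD j none = x := by
  cases j with
  | zero => simp [List.getD]
  | succ j' =>
    have hj' : j' < r.length := by omega
    have : (r ++ rest)[j']? = r[j']? := List.getElem?_append_left hj'
    simp [List.getD, this, hj', hr r[j'] (List.getElem_mem hj')]

-- ===== A = segGroups =====
theorem seg_gen (labels : List (Option String)) :
    ∀ (suf pre : List (Option String)) (x : Option String) (mid : List (Option String))
      (acc : List (Int × Int × Option String)),
      labels = pre ++ x :: mid ++ suf →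
      (∀ y ∈ mid, y = x) →
      ((PySem.List.pyRange ((pre.length : Int) + 1 + (mid.length : Int))
          ((labels.length : Int) + 1) 1).foldl (segStepA labels labels.length)
          (acc, (pre.length : Int))).1
        = acc ++ segGroups (pre.length : Int) (x :: (mid ++ suf)) := by
  intro suf
  induction suf with
  | nil =>
    intro pre x mid acc hlab hmid
    have hn : (labels.length : Int) = (pre.length : Int) + 1 + (mid.length : Int) := by
      subst hlab; simp; omega
    rw [hn, PySem.List.pyRange_one_singleton]
    have hx : PySem.List.pyGetD labels (pre.length : Int) none = x := by
      subst hlab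
      simpa using getD_append_length pre x (mid ++ []) none
    have hrun : mid.takeWhile (fun y => y == x) = mid := by
      rw [List.takeWhile_eq_self_iff]
      intro y hy; simp [hmid y hy]
    have hdrop : mid.dropWhile (fun y => y == x) = [] := by
      rw [List.dropWhile_eq_nil_iff]
      intro y hy; simp [hmid y hy]
    simp only [List.foldl_cons, List.foldl_nil, segStepA, lt_irrefl, false_and, if_false, hx]
    rw [show segGroups (pre.length : Int) (x :: (mid ++ []))
          = [((pre.length : Int), (pre.length : Int) + 1 + (mid.length : Int), x)] by
      rw [segGroups]
      simp [hrun, hdrop, segGroups]]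
  | cons y suf' ih =>
    intro pre x mid acc hlab hmid
    have hlen : (pre.length : Int) + 1 + (mid.length : Int) < (labels.length : Int) := by
      subst hlab; simp; omega
    rw [PySem.List.pyRange_one_cons (by omega)]
    have hx : PySem.List.pyGetD labels (pre.length : Int) none = x := by
      subst hlab
      simpa using getD_append_length pre x (mid ++ y :: suf') none
    have hpre' : labels = (pre ++ x :: mid) ++ y :: suf' := by
      simp [hlab]
    have hlen' : (pre ++ x :: mid).length = pre.length + 1 + mid.length := by
      simp; omega
    have e : ((pre ++ x :: mid).length : Int) = (pre.length : Int) + 1 + (mid.length : Int) := by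
      rw [hlen']; push_cast; ring
    have hy : PySem.List.pyGetD labels ((pre.length : Int) + 1 + (mid.length : Int)) none = y := by
      rw [hpre', ← e, PySem.List.pyGetD_natCast]
      exact getD_append_length _ y suf' none
    simp only [List.foldl_cons, segStepA, hx, hy, hlen, true_and]
    by_cases hxy : y = x
    · -- skip: extend mid by y
      rw [if_pos hxy]
      have hmid' : ∀ z ∈ mid ++ [y], z = x := by
        intro z hz
        rcases List.mem_append.1 hz with h | h
        · exact hmid z h
        · simp at h; simpa [h] using hxy
      have hih := ih pre x (mid ++ [y]) acc (by simp [hlab]) hmid'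
      have e2 : (((mid ++ [y]).length : Nat) : Int) = (mid.length : Int) + 1 := by simp
      rw [e2, show (pre.length : Int) + 1 + ((mid.length : Int) + 1)
            = (pre.length : Int) + 1 + (mid.length : Int) + 1 by ring] at hih
      rw [hih]
      congr 2
      simp
    · -- new run: append a segment, restart at y
      rw [if_neg (by simpa using hxy)]
      have hih := ih (pre ++ x :: mid) y []
        (acc ++ [((pre.length : Int), (pre.length : Int) + 1 + (mid.length : Int), x)])
        (by simp [hlab]) (by simp)
      rw [e] at hih
      simp only [List.length_nil, Nat.cast_zero, add_zero, List.nil_append] at hih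
      rw [hih]
      have hrun2 : (mid ++ y :: suf').takeWhile (fun z => z == x) = mid := by
        rw [List.takeWhile_append_of_pos]
        · simp [hxy]
        · intro z hz; simp [hmid z hz]
      have hdrop2 : (mid ++ y :: suf').dropWhile (fun z => z == x) = y :: suf' := by
        have hd : mid.dropWhile (fun z => z == x) = [] := by
          rw [List.dropWhile_eq_nil_iff]
          intro z hz; simp [hmid z hz]
        rw [List.dropWhile_append, hd]
        simp [hxy]
      rw [show segGroups (pre.length : Int) (x :: (mid ++ y :: suf'))
            = ((pre.length : Int), (pre.length : Int) + 1 + (mid.length : Int), x) ::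
              segGroups ((pre.length : Int) + 1 + (mid.length : Int)) (y :: suf') by
        rw [segGroups]; simp [hrun2, hdrop2]]
      simp

-- ===== B = segGroups =====

theorem segGroups_shift : ∀ (l : List (Option String)) (c d : Int),
    segGroups (c + d) l = (segGroups d l).map (fun t => (c + t.1, c + t.2.1, t.2.2))
  | [], c, d => by rw [segGroups, segGroups]; simp
  | x :: rest, c, d => by
    rw [segGroups, segGroups]
    have := segGroups_shift (rest.dropWhile (fun y => y == x)) c
      (d + 1 + (rest.takeWhile (fun y => y == x)).length)
    simp only [List.map_cons]
    rw [show c + d + 1 + ((rest.takeWhile (fun y => y == x)).length : Int)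
          = c + (d + 1 + ((rest.takeWhile (fun y => y == x)).length : Int)) by ring, this]
termination_by l => l.length
decreasing_by
  simpa using Nat.lt_succ_of_le (List.length_dropWhile_le _ _)

-- every boundary list starts with 0
theorem boundsN_head : ∀ (l : List (Option String)), ∃ tl, boundsN l = 0 :: tl := by
  intro l
  cases l with
  | nil => exact ⟨[], rfl⟩
  | cons x t =>
    refine ⟨((List.range t.length).map (fun k => 1 + k)).filter (predB (x :: t))
      ++ [(x :: t).length], ?_⟩
    unfold boundsN
    rw [show (x :: t).length = 1 + t.length by simp [Nat.add_comm], List.range_add,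
      List.filter_append]
    simp [predB, Nat.add_comm]

-- run decomposition of the boundary list
theorem boundsN_run (x : Option String) (t : List (Option String)) :
    boundsN (x :: t)
      = 0 :: (boundsN (t.dropWhile (fun y => y == x))).map
          (fun j => (t.takeWhile (fun y => y == x)).length + 1 + j) := by
  set r := t.takeWhile (fun y => y == x) with hr
  set rest := t.dropWhile (fun y => y == x) with hrest
  have ht : r ++ rest = t := List.takeWhile_append_dropWhile
  have hrx : ∀ y ∈ r, y = x := by
    intro y hy
    have := List.mem_takeWhile_imp (hr ▸ hy)
    simpa using this
  have hct : x :: t = x :: r ++ rest := by rw [← ht]; simp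
  have hlen : (x :: t).length = (r.length + 1) + rest.length := by
    simp [← ht]; omega
  have hgk : ∀ i, (x :: t).getD ((r.length + 1) + i) none = rest.getD i none := by
    intro i
    rw [hct, show r.length + 1 = (x :: r).length by simp]
    exact getD_append_add (x :: r) rest i none
  have hpred0 : ∀ j ∈ List.range (r.length + 1), predB (x :: t) j = (j == 0) := by
    intro j hj
    rw [List.mem_range] at hj
    cases j with
    | zero => simp [predB]
    | succ j' =>
      have e1 : (x :: t).getD (j' + 1) none = x := by
        rw [hct]; exact getD_run x r rest hrx (j' + 1) (by omega)
      have e2 : (x :: t).getD j' none = x := by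
        rw [hct]; exact getD_run x r rest hrx j' (by omega)
      simp only [predB, Nat.add_sub_cancel, e1, e2]
      simp
  have hshift : ∀ j ∈ List.range rest.length,
      predB (x :: t) ((r.length + 1) + j) = predB rest j := by
    intro j hj
    rw [List.mem_range] at hj
    cases j with
    | zero =>
      have hne : rest ≠ [] := by
        intro h; rw [h] at hj; simp at hj
      obtain ⟨a, b, hab⟩ : ∃ a b, rest = a :: b := by
        match h : rest, hne with
        | a :: b, _ => exact ⟨a, b, rfl⟩
      have hax : ((a == x) : Bool) = false := by
        have hne' : t.dropWhile (fun y => y == x) ≠ [] := by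
          rw [← hrest, hab]; simp
        have := List.head_dropWhile_not (fun y => y == x) hne'
        have hh : (t.dropWhile (fun y => y == x)).head hne' = a := by
          have : t.dropWhile (fun y => y == x) = a :: b := by rw [← hrest, hab]
          simp [this]
        rwa [hh] at this
      have e1 : (x :: t).getD (r.length + 1) none = a := by
        have := hgk 0
        simpa [hab, List.getD] using this
      have e2 : (x :: t).getD (r.length + 1 - 1) none = x := by
        rw [show r.length + 1 - 1 = r.length from rfl, hct]
        exact getD_run x r rest hrx r.length (le_refl _)
      simp only [Nat.add_zero, predB, e1, e2, hab]
      simp [hax, List.getD]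
    | succ j' =>
      have e1 : (x :: t).getD ((r.length + 1) + (j' + 1)) none = rest.getD (j' + 1) none :=
        hgk (j' + 1)
      have e2 : (x :: t).getD ((r.length + 1) + (j' + 1) - 1) none = rest.getD j' none := by
        rw [show (r.length + 1) + (j' + 1) - 1 = (r.length + 1) + j' from by omega]
        exact hgk j'
      simp only [predB, e1, e2]
      have hn0 : ((r.length + 1 + (j' + 1) == 0) : Bool) = false := by simp
      simp [hn0]
  have hfilter0 : (List.range (r.length + 1)).filter (fun j => j == 0) = [0] := by
    rw [show r.length + 1 = 1 + r.length from by omega, List.range_add, List.filter_append]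
    simp
  unfold boundsN
  rw [hlen, List.range_add, List.filter_append, List.filter_congr hpred0, hfilter0,
    List.filter_map, List.filter_congr (by simpa using hshift)]
  simp [Nat.add_comm, Nat.add_left_comm]

-- the zip-of-boundaries segments equal the run-grouping segments
theorem resN_eq : ∀ (l : List (Option String)), resN l = segGroups 0 l
  | [] => by rw [segGroups]; simp [resN, boundsN]
  | x :: t => by
    rw [segGroups]
    obtain ⟨tl, htl⟩ := boundsN_head (t.dropWhile (fun y => y == x))
    have hrun := boundsN_run x t
    have ih := resN_eq (t.dropWhile (fun y => y == x))
    -- abbreviations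
    set r := t.takeWhile (fun y => y == x) with hr
    set rest := t.dropWhile (fun y => y == x) with hrest
    set k := r.length + 1 with hk
    set bs := boundsN rest with hbs
    have hsh := segGroups_shift rest ((k : Nat) : Int) 0
    -- shifted lookup
    have hgk : ∀ i, (x :: t).getD (k + i) none = rest.getD i none := by
      intro i
      have hct : x :: t = (x :: r) ++ rest := by
        rw [← List.takeWhile_append_dropWhile (p := fun y => y == x) (l := t)]
        simp [← hr, ← hrest]
      rw [hct, show k = (x :: r).length by simp [hk]]
      exact getD_append_add (x :: r) rest i none
    -- unfold resN on x :: t using the run decomposition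
    unfold resN
    rw [hrun, htl]
    simp only [List.map_cons, List.drop_succ_cons, List.drop_zero, List.zip_cons_cons]
    -- now the tail zip is over mapped bounds
    have htail : ((k + 0) :: (tl.map (fun j => k + j))) = (0 :: tl).map (fun j => k + j) := by
      simp
    rw [htail, show tl.map (fun j => k + j) = ((0 :: tl).map (fun j => k + j)).drop 1 by simp,
      ← htl, ← List.map_drop, List.zip_map, List.map_map]
    -- rewrite the recursive segGroups call via shift and ih
    rw [show (0 : Int) + 1 + ((r.length : Nat) : Int) = ((k : Nat) : Int) by
        simp [hk]; omega,
      show ((k : Nat) : Int) = ((k : Nat) : Int) + 0 by ring, hsh, ← ih]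
    unfold resN
    rw [List.map_map]
    congr 1
    rw [← hbs]
    apply List.map_congr_left
    intro p _
    simp only [Function.comp, Prod.map, Prod.mk.injEq]
    refine ⟨by push_cast; ring, by push_cast; ring, ?_⟩
    simpa [List.getD] using hgk p.1
termination_by l => l.length
decreasing_by
  simpa using Nat.lt_succ_of_le (List.length_dropWhile_le _ _)

-- B's port computes resN
theorem alt_eq_resN (l : List (Option String)) : segment_labels_py_alt l = resN l := by
  cases l with
  | nil => simp [segment_labels_py_alt, resN, boundsN]
  | cons x t =>
    simp only [segment_labels_py_alt]
    rw [if_neg (show ¬((((x :: t).length : Nat) : Int) = 0) by push_cast [List.length_cons]; omega)]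
    have hb : ((PySem.List.pyRange 0 (((x :: t).length : Nat) : Int) 1).filter
          (fun i => i == 0 ||
            !(PySem.List.pyGetD (x :: t) i none == PySem.List.pyGetD (x :: t) (i-1) none)))
        ++ [(((x :: t).length : Nat) : Int)]
        = (boundsN (x :: t)).map (fun n : Nat => (n : Int)) := by
      rw [PySem.List.pyRange_zero_natCast, List.filter_map]
      unfold boundsN
      rw [List.map_append]
      congr 1
      · apply congrArg
        apply List.filter_congr
        intro j _
        cases j with
        | zero => simp [predB]
        | succ j' =>
          have h1 : (((j' + 1 : Nat) : Int)) - 1 = ((j' : Nat) : Int) := by push_cast; ring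
          have c1 : ((((j' + 1 : Nat) : Int)) == 0) = false := by
            simp only [beq_eq_false_iff_ne, ne_eq]
            push_cast
            omega
          have c2 : (((j' + 1 : Nat)) == 0) = false := by simp
          simp only [Function.comp, h1, PySem.List.pyGetD_natCast, predB,
            Nat.add_sub_cancel, c1, c2]
    rw [hb, ← List.map_drop, List.zip_map, List.map_map]
    unfold resN
    apply List.map_congr_left
    intro p _
    simp only [Function.comp, Prod.map, Prod.mk.injEq]
    refine ⟨trivial, trivial, ?_⟩
    simpa [List.getD] using PySem.List.pyGetD_natCast (x :: t) p.1 none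


-- ===== VERDICT (by name: the statement is the Claim_ definition above) =====
theorem segment_labels_py_spec : Claim_equal_segment_labels_py := by
  intro labels _
  unfold Spec_segment_labels_py
  rw [alt_eq_resN, resN_eq]
  unfold segment_labels_py
  cases labels with
  | nil => rw [segGroups]; simp
  | cons x rest =>
    simp only [if_neg (List.cons_ne_nil x rest)]
    have := seg_gen (x :: rest) rest [] x [] [] (by simp) (by simp)
    simpa using this
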